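-- pv_equiv track=rewrite | github.com/eelectronn/combinatoricsOnWords | register.py | ccr2_next
-- ===== SOURCE A (Python) =====
-- def is_necklace(seq):
--     n = len(seq)
--     p = 1
--     for i in range(1, n):
--         if seq[i - p] > seq[i]:
--             return False
--         if seq[i - p] < seq[i]:
--             p = i + 1
--     if n % p != 0:
--         return False
--     return True
--
-- def is_co_necklace(seq):
--     n = len(seq)
--     for i in range(n):
--         seq += str(1 - int(seq[i], 10))
--     return is_necklace(seq)
--
-- def flip_bits(seq):
--     s = ''
--     for i in range(len(seq)):
--         s += str(1 - int(seq[i], 10))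
--     return s
--
-- def ccr2_next(seq):
--     n = len(seq)
--     j = n - 1
--     for i in range(n - 1, -1, -1):
--         if seq[i] == '1':
--             j = i
--             break
--     gemma = seq[j+1:] + '1' + flip_bits(seq[1:j+1])
--     if is_co_necklace(gemma):
--         return seq[0]
--     return str(1 - int(seq[0], 10))
-- ===== SOURCE B (Python) =====
-- def flip_bits(seq):
--     return ''.join({'0': '1', '1': '0'}[c] for c in seq)
--
-- def is_necklace(seq):
--     return all(seq <= seq[i:] + seq[:i] for i in range(len(seq)))
--
-- def is_co_necklace(seq):
--     return is_necklace(seq + flip_bits(seq))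
--
-- def ccr2_next(seq):
--     j = seq.rfind('1')
--     if j < 0:
--         j = len(seq) - 1
--     gamma = seq[j+1:] + '1' + flip_bits(seq[1:j+1])
--     return seq[0] if is_co_necklace(gamma) else flip_bits(seq[0])
-- ===== Notes on version B (the rewrite author's own statement) =====
-- stated objective: idiomatic
-- what changed: is_necklace is re-implemented from the definition, comparing seq against each of its rotations (all(seq <= seq[i:]+seq[:i] ...)) instead of A's single-pass period-tracking (Duval/FKM) test; is_co_necklace becomes is_necklace(seq + flip_bits(seq)), flip_bits becomes a join over a bit-swap table, and the last one-bit is found with rfind instead of a manual downward break loop.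
-- outside the precondition, e.g. on ccr2_next('20'): A returns '-1', B raises KeyError; on ccr2_next('2'): A returns '-1', B raises KeyError; on ccr2_next(''): A raises IndexError, B raises IndexError
import Mathlib
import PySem

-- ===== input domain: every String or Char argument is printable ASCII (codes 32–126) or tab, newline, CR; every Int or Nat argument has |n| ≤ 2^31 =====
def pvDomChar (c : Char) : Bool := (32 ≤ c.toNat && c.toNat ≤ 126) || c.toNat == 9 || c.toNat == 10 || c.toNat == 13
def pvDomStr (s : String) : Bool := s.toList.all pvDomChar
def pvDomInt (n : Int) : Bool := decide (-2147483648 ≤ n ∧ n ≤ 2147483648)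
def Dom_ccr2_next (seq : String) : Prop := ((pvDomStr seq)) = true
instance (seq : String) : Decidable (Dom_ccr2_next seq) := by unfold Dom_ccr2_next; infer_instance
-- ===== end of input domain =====

-- B replaces A's single-pass period-tracking (Duval/FKM) necklace test by the direct
-- "≤ all rotations" definition and finds the last '1' with rfind; same values on all
-- nonempty bit strings (objective: simpler/idiomatic, not faster).

-- ===== PORT A =====

-- for i in range(n-1,-1,-1): if seq[i]=='1': j=i; break   (counter k = i+1; none = no break)
def pvScanDown (cs : List Char) : Nat → Option Nat
  | 0 => none
  | k + 1 => if PySem.List.pyGet? cs ((k : Nat) : Int) = some '1' then some k else pvScanDown cs k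

-- the p/i loop of is_necklace (a,b : the chars seq[i-p], seq[i]; IndexError branch unreachable)
def pvNeckGo (cs : List Char) (n i p : Nat) : Bool :=
  if _h : i < n then
    match PySem.List.pyGet? cs ((i : Int) - (p : Int)), PySem.List.pyGet? cs ((i : Nat) : Int) with
    | some a, some b =>
      if a > b then false
      else pvNeckGo cs n (i + 1) (if a < b then i + 1 else p)
    | _, _ => false
  else decide (n % p = 0)
termination_by n - i

def pvIsNecklaceA (cs : List Char) : Bool := pvNeckGo cs cs.length 1 1

-- one iteration of `s += str(1 - int(seq[i], 10))` reading the FIXED string cs (flip_bits)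
def pvFlipStepA (cs : List Char) (s : List Char) (i : Int) : List Char :=
  match PySem.List.pyGet? cs i with
  | some c =>
    match PySem.Int.ofCharsBase? [c] 10 with
    | some v => s ++ PySem.Int.toChars (1 - v)
    | none => s          -- ValueError: excluded by Pre_
  | none => s            -- IndexError: unreachable

def pvFlipA (cs : List Char) : List Char :=
  (PySem.List.pyRange 0 (cs.length : Int)).foldl (pvFlipStepA cs) []

-- one iteration of `seq += str(1 - int(seq[i], 10))` reading the GROWING string (is_co_necklace)
def pvCoStepA (s : List Char) (i : Int) : List Char :=
  match PySem.List.pyGet? s i with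
  | some c =>
    match PySem.Int.ofCharsBase? [c] 10 with
    | some v => s ++ PySem.Int.toChars (1 - v)
    | none => s          -- ValueError: excluded by Pre_
  | none => s            -- IndexError: unreachable

def pvCoSeqA (cs : List Char) : List Char :=
  (PySem.List.pyRange 0 (cs.length : Int)).foldl pvCoStepA cs

def pvIsCoNecklaceA (cs : List Char) : Bool := pvIsNecklaceA (pvCoSeqA cs)

def pvJA (cs : List Char) : Int :=
  match pvScanDown cs cs.length with
  | some i => (i : Int)
  | none => (cs.length : Int) - 1

def pvGemmaA (cs : List Char) : List Char :=
  PySem.List.slice cs (some (pvJA cs + 1)) none ++ ['1'] ++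
    pvFlipA (PySem.List.slice cs (some 1) (some (pvJA cs + 1)))

def ccr2_next (seq : String) : String :=
  if pvIsCoNecklaceA (pvGemmaA seq.toList) then
    match PySem.List.pyGet? seq.toList ((0 : Nat) : Int) with
    | some c => String.ofList [c]
    | none => ""         -- IndexError on '': excluded by Pre_
  else
    match PySem.List.pyGet? seq.toList ((0 : Nat) : Int) with
    | some c =>
      match PySem.Int.ofCharsBase? [c] 10 with
      | some v => String.ofList (PySem.Int.toChars (1 - v))
      | none => ""       -- ValueError: excluded by Pre_
    | none => ""         -- IndexError on '': excluded by Pre_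

-- ===== PORT B =====

-- the bit-swap table lookup of Source B's flip_bits; the final else is the KeyError branch,
-- unreachable on the bit strings Pre_ admits
def pvFlipc (c : Char) : Char := if c = '0' then '1' else if c = '1' then '0' else c

def pvFlipB (cs : List Char) : List Char := cs.map pvFlipc

-- all(seq <= seq[i:] + seq[:i] for i in range(len(seq)))
def pvIsNecklaceB (cs : List Char) : Bool :=
  (PySem.List.pyRange 0 (cs.length : Int)).all (fun i =>
    decide (cs ≤ PySem.List.slice cs (some i) none ++ PySem.List.slice cs none (some i)))

def pvIsCoNecklaceB (cs : List Char) : Bool := pvIsNecklaceB (cs ++ pvFlipB cs)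

def pvJB (cs : List Char) : Int :=
  if PySem.Chars.rfind cs ['1'] < 0 then (cs.length : Int) - 1 else PySem.Chars.rfind cs ['1']

def pvGammaB (cs : List Char) : List Char :=
  PySem.List.slice cs (some (pvJB cs + 1)) none ++ ['1'] ++
    pvFlipB (PySem.List.slice cs (some 1) (some (pvJB cs + 1)))

def ccr2_next_alt (seq : String) : String :=
  match seq.toList with
  | [] => ""             -- IndexError on '': excluded by Pre_
  | c :: _ =>
    if pvIsCoNecklaceB (pvGammaB seq.toList) then String.ofList [c]
    else String.ofList (pvFlipB [c])

-- ===== PRECONDITION & SPEC =====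

-- Pre_ is the register's natural domain: nonempty bit strings. A raises IndexError on the
-- empty string and ValueError on most other excluded strings; on the few non-binary digit
-- strings where it does return (e.g. '20'), its value is an accident of 1-int(c) arithmetic
-- outside the register's domain.
def Pre_ccr2_next (seq : String) : Prop :=
  seq.toList ≠ [] ∧ seq.toList.all (fun c => c == '0' || c == '1') = true
instance (seq : String) : Decidable (Pre_ccr2_next seq) := by unfold Pre_ccr2_next; infer_instance

def pvWitness_ccr2_next : String := "0111"

def Spec_ccr2_next (seq : String) (out : String) : Prop := out = ccr2_next_alt seq
instance (seq : String) (out : String) : Decidable (Spec_ccr2_next seq out) := by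
  unfold Spec_ccr2_next; infer_instance

-- ===== CLAIM (what is proved, stated in full; the proofs are below) =====
def Claim_equal_ccr2_next : Prop :=
  ∀ (seq : String), Dom_ccr2_next seq → Pre_ccr2_next seq → Spec_ccr2_next seq (ccr2_next seq)

-- ===== LEMMAS AND PROOFS =====

/- Notation used throughout: `pvG cs k` is the k-th character (out of range: ' ', only
   ever used in range), `pvRot cs m` the m-th rotation, `pvNSpec cs` the mathematical
   necklace predicate "cs is ≤ all of its rotations". -/

def pvG (cs : List Char) (k : Nat) : Char := cs.getD k ' '

def pvRot (cs : List Char) (m : Nat) : List Char := cs.drop m ++ cs.take m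

def pvNSpec (cs : List Char) : Prop := ∀ m, m < cs.length → cs ≤ pvRot cs m

def pvBin (cs : List Char) : Prop := ∀ c ∈ cs, c = '0' ∨ c = '1'

lemma pvG_eq_getElem {cs : List Char} {k : Nat} (h : k < cs.length) : pvG cs k = cs[k] := by
  simp [pvG, List.getD_eq_getElem?_getD, List.getElem?_eq_getElem h]

lemma pvPyGet_some {cs : List Char} {k : Nat} (h : k < cs.length) :
    PySem.List.pyGet? cs ((k : Nat) : Int) = some (pvG cs k) := by
  rw [PySem.List.pyGet?_natCast, List.getElem?_eq_getElem h, pvG_eq_getElem h]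

lemma pvRot_length (cs : List Char) {m : Nat} (h : m ≤ cs.length) :
    (pvRot cs m).length = cs.length := by
  simp [pvRot]; omega

lemma pvEq_of_G {cs ds : List Char} (hlen : ds.length = cs.length)
    (h : ∀ l, l < cs.length → pvG cs l = pvG ds l) : cs = ds := by
  refine List.ext_getElem hlen.symm (fun i h1 h2 => ?_)
  have := h i h1
  rwa [pvG_eq_getElem h1, pvG_eq_getElem h2] at this

lemma pvG_rot (cs : List Char) {m l : Nat} (hm : m ≤ cs.length) (hl : l < cs.length) :
    pvG (pvRot cs m) l =
      if l < cs.length - m then pvG cs (m + l) else pvG cs (l - (cs.length - m)) := by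
  unfold pvRot pvG
  rw [List.getD_eq_getElem?_getD, List.getElem?_append]
  simp only [List.length_drop]
  split_ifs with h1
  · rw [List.getElem?_drop, List.getD_eq_getElem?_getD]
  · rw [List.getElem?_take, if_pos (by omega), List.getD_eq_getElem?_getD]

lemma pvG_rot_mod (cs : List Char) {m l : Nat} (hm : m < cs.length) (hl : l < cs.length) :
    pvG (pvRot cs m) l = pvG cs ((m + l) % cs.length) := by
  rw [pvG_rot cs (le_of_lt hm) hl]
  split_ifs with h1
  · congr 1; rw [Nat.mod_eq_of_lt (by omega)]
  · congr 1
    rw [Nat.mod_eq_sub_mod (by omega), Nat.mod_eq_of_lt (by omega)]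
    omega

lemma pvLex_of_mismatch : ∀ (j : Nat) (cs ds : List Char), ds.length = cs.length →
    j < cs.length → (∀ l, l < j → pvG cs l = pvG ds l) → pvG cs j < pvG ds j →
    List.Lex (· < ·) cs ds := by
  intro j
  induction j with
  | zero =>
    intro cs ds hlen hj _ hlt
    cases cs with
    | nil => simp at hj
    | cons a cs' =>
      cases ds with
      | nil => simp at hlen
      | cons b ds' =>
        exact List.Lex.rel (by simpa [pvG] using hlt)
  | succ j ih =>
    intro cs ds hlen hj hagree hlt
    cases cs with
    | nil => simp at hj
    | cons a cs' =>
      cases ds with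
      | nil => simp at hlen
      | cons b ds' =>
        have h0 : a = b := by simpa [pvG] using hagree 0 (Nat.succ_pos j)
        subst h0
        refine List.Lex.cons (ih cs' ds' (by simpa using hlen) (by simpa using hj)
          (fun l hl => by simpa [pvG] using hagree (l + 1) (by omega))
          (by simpa [pvG] using hlt))

lemma pvLt_iff (cs ds : List Char) : cs < ds ↔ List.Lex (· < ·) cs ds := Iff.rfl

lemma pvAddMod {m l p : Nat} (h : m % p + l < p) : (m + l) % p = m % p + l := by
  rw [Nat.add_mod, Nat.mod_eq_of_lt (show l < p by omega), Nat.mod_eq_of_lt h]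

-- the loop invariant: p-periodicity of the processed prefix, and take p cs is Lyndon
-- (strictly smaller than each of its proper suffixes, with the witness mismatch position)
def pvInv (cs : List Char) (i p : Nat) : Prop :=
  1 ≤ p ∧ p ≤ i ∧ (∀ k, k < i → pvG cs k = pvG cs (k % p)) ∧
  (∀ m, 0 < m → m < p → ∃ j, j < p - m ∧
    (∀ l, l < j → pvG cs l = pvG cs (m + l)) ∧ pvG cs j < pvG cs (m + j))

lemma pvInv_step_eq {cs : List Char} {i p : Nat} (hinv : pvInv cs i p)
    (heq : pvG cs (i % p) = pvG cs i) : pvInv cs (i + 1) p := by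
  obtain ⟨hp1, hpi, hper, hlyn⟩ := hinv
  refine ⟨hp1, by omega, ?_, hlyn⟩
  intro k hk
  rcases Nat.lt_or_ge k i with h | h
  · exact hper k h
  · have : k = i := by omega
    subst this
    exact heq.symm

lemma pvInv_step_lt {cs : List Char} {i p : Nat} (hinv : pvInv cs i p)
    (hlt : pvG cs (i % p) < pvG cs i) : pvInv cs (i + 1) (i + 1) := by
  obtain ⟨hp1, hpi, hper, hlyn⟩ := hinv
  have hp0 : 0 < p := hp1
  refine ⟨by omega, by omega, ?_, ?_⟩
  · intro k hk
    rw [Nat.mod_eq_of_lt (by omega)]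
  · intro m hm0 hmi1
    by_cases hm' : m % p = 0
    · -- p divides m; witness i - m
      refine ⟨i - m, by omega, ?_, ?_⟩
      · intro l hl
        rw [hper l (by omega), hper (m + l) (by omega)]
        congr 1
        rw [Nat.add_mod, hm', Nat.zero_add, Nat.mod_mod_of_dvd _ (dvd_refl p)]
      · have hml : m + (i - m) = i := by omega
        rw [hml, hper (i - m) (by omega)]
        have : (i - m) % p = i % p := by
          conv_rhs => rw [show i = (i - m) + m by omega]
          rw [Nat.add_mod, hm', Nat.add_zero, Nat.mod_mod_of_dvd _ (dvd_refl p)]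
        rw [this]
        exact hlt
    · -- use the Lyndon witness at m % p
      have hm'p : m % p < p := Nat.mod_lt _ hp0
      obtain ⟨j, hjlt, hagree, hstrict⟩ := hlyn (m % p) (Nat.pos_of_ne_zero hm') hm'p
      by_cases hcase : j < i - m
      · refine ⟨j, by omega, ?_, ?_⟩
        · intro l hl
          rw [hper l (by omega), hper (m + l) (by omega), Nat.mod_eq_of_lt (by omega),
            pvAddMod (by omega)]
          exact hagree l hl
        · rw [hper (m + j) (by omega), pvAddMod (by omega)]
          exact hstrict
      · refine ⟨i - m, by omega, ?_, ?_⟩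
        · intro l hl
          rw [hper l (by omega), hper (m + l) (by omega), Nat.mod_eq_of_lt (by omega),
            pvAddMod (by omega)]
          exact hagree l (by omega)
        · have hml : m + (i - m) = i := by omega
          rw [hml]
          have hmod : (m % p + (i - m)) % p = i % p := by
            conv_rhs => rw [show i = m + (i - m) by omega]
            rw [Nat.add_mod m (i - m) p, Nat.mod_eq_of_lt (show i - m < p by omega)]
          rcases Nat.lt_or_ge (i - m) j with hlt2 | hge2
          · have h1 := hagree (i - m) hlt2
            have h2 : (m % p + (i - m)) = i % p := by
              rw [← hmod, Nat.mod_eq_of_lt (show m % p + (i - m) < p by omega)]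
            rw [h1, h2]
            exact hlt
          · have hij : i - m = j := by omega
            have h2 : m % p + j = i % p := by
              rw [← hmod, hij, Nat.mod_eq_of_lt (show m % p + j < p by omega)]
            rw [hij]
            calc pvG cs j < pvG cs (m % p + j) := hstrict
              _ = pvG cs (i % p) := by rw [h2]
              _ < pvG cs i := hlt

lemma pvNotSpec_of_gt {cs : List Char} {i p : Nat} (hinv : pvInv cs i p)
    (hin : i < cs.length) (hgt : pvG cs i < pvG cs (i % p)) : ¬ pvNSpec cs := by
  obtain ⟨hp1, hpi, hper, _⟩ := hinv
  have hp0 : 0 < p := hp1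
  have hj0 : i % p < p := Nat.mod_lt _ hp0
  set m := i - i % p with hm
  have hdm := Nat.div_add_mod i p
  have hmp : m % p = 0 := by
    have hm2 : m = p * (i / p) := by omega
    rw [hm2, Nat.mul_mod_right]
  intro hspec
  have hmn : m < cs.length := by omega
  have hle := hspec m hmn
  have hlex : List.Lex (· < ·) (pvRot cs m) cs := by
    refine pvLex_of_mismatch (i % p) (pvRot cs m) cs (pvRot_length cs (by omega)).symm
      (by rw [pvRot_length cs (by omega)]; omega) ?_ ?_
    · intro l hl
      rw [pvG_rot_mod cs hmn (by omega),
        Nat.mod_eq_of_lt (show m + l < cs.length by omega),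
        hper (m + l) (by omega), pvAddMod (show m % p + l < p by omega), hmp,
        Nat.zero_add]
    · rw [pvG_rot_mod cs hmn (by omega)]
      have h3 : (m + i % p) % cs.length = i := by
        rw [show m + i % p = i by omega, Nat.mod_eq_of_lt hin]
      rw [h3]
      exact hgt
  exact absurd hle (not_le.mpr hlex)

lemma pvSpec_of_dvd {cs : List Char} {p : Nat} (hinv : pvInv cs cs.length p)
    (hd : cs.length % p = 0) : pvNSpec cs := by
  obtain ⟨hp1, hpn, hper, hlyn⟩ := hinv
  have hp0 : 0 < p := hp1
  have hdvd : p ∣ cs.length := Nat.dvd_of_mod_eq_zero hd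
  intro m hm
  by_cases hm' : m % p = 0
  · -- the rotation is cs itself
    apply le_of_eq
    apply pvEq_of_G (pvRot_length cs (by omega))
    intro l hl
    rw [pvG_rot_mod cs hm hl,
      hper ((m + l) % cs.length) (Nat.mod_lt _ (by omega)),
      Nat.mod_mod_of_dvd _ hdvd, Nat.add_mod, hm', Nat.zero_add,
      Nat.mod_mod_of_dvd _ (dvd_refl p), ← hper l hl]
  · obtain ⟨j, hjlt, hagree, hstrict⟩ := hlyn (m % p) (Nat.pos_of_ne_zero hm')
      (Nat.mod_lt _ hp0)
    apply le_of_lt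
    rw [pvLt_iff]
    apply pvLex_of_mismatch j cs (pvRot cs m) (pvRot_length cs (by omega)) (by omega)
    · intro l hl
      rw [pvG_rot_mod cs hm (by omega),
        hper ((m + l) % cs.length) (Nat.mod_lt _ (by omega)),
        Nat.mod_mod_of_dvd _ hdvd, pvAddMod (by omega)]
      exact hagree l hl
    · rw [pvG_rot_mod cs hm (by omega),
        hper ((m + j) % cs.length) (Nat.mod_lt _ (by omega)),
        Nat.mod_mod_of_dvd _ hdvd, pvAddMod (by omega)]
      exact hstrict

lemma pvNotSpec_of_ndvd {cs : List Char} {p : Nat} (hinv : pvInv cs cs.length p)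
    (hd : cs.length % p ≠ 0) : ¬ pvNSpec cs := by
  obtain ⟨hp1, hpn, hper, hlyn⟩ := hinv
  have hp0 : 0 < p := hp1
  set n := cs.length with hn
  set j0 := n % p with hj0def
  have hj00 : 0 < j0 := Nat.pos_of_ne_zero hd
  have hj0p : j0 < p := Nat.mod_lt _ hp0
  set m := n - j0 with hmdef
  have hdm := Nat.div_add_mod n p
  have hmp : m % p = 0 := by
    have hm2 : m = p * (n / p) := by omega
    rw [hm2, Nat.mul_mod_right]
  have hmn : m < n := by omega
  have hm0 : 0 < m := by omega
  obtain ⟨jj, hjjlt, hagree, hstrict⟩ := hlyn j0 hj00 hj0p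
  intro hspec
  have hle := hspec m hmn
  have hlex : List.Lex (· < ·) (pvRot cs m) cs := by
    refine pvLex_of_mismatch (j0 + jj) (pvRot cs m) cs (pvRot_length cs (by omega)).symm
      (by rw [pvRot_length cs (by omega)]; omega) ?_ ?_
    · intro l hl
      rcases Nat.lt_or_ge l j0 with hc | hc
      · rw [pvG_rot_mod cs hmn (by omega),
          Nat.mod_eq_of_lt (show m + l < n by omega),
          hper (m + l) (by omega), pvAddMod (show m % p + l < p by omega), hmp,
          Nat.zero_add]
      · have hl' : l = j0 + (l - j0) := by omega
        rw [pvG_rot_mod cs hmn (by omega)]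
        have h4 : (m + l) % n = l - j0 := by
          rw [show m + l = n + (l - j0) by omega, Nat.add_mod_left,
            Nat.mod_eq_of_lt (by omega)]
        rw [h4]
        conv_rhs => rw [hl']
        exact hagree (l - j0) (by omega)
    · rw [pvG_rot_mod cs hmn (by omega)]
      have h4 : (m + (j0 + jj)) % n = jj := by
        rw [show m + (j0 + jj) = n + jj by omega, Nat.add_mod_left,
          Nat.mod_eq_of_lt (by omega)]
      rw [h4]
      exact hstrict
  exact absurd hle (not_le.mpr hlex)

lemma pvNeckGo_iff_aux (cs : List Char) :
    ∀ (d i p : Nat), cs.length - i = d → pvInv cs i p → i ≤ cs.length →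
      (pvNeckGo cs cs.length i p = true ↔ pvNSpec cs) := by
  intro d
  induction d using Nat.strong_induction_on with
  | _ d ih =>
    intro i p hd hinv hi
    have hinv' := hinv
    obtain ⟨hp1, hpi, hper, hlyn⟩ := hinv
    unfold pvNeckGo
    by_cases h : i < cs.length
    · rw [dif_pos h]
      have hcast : (i : Int) - (p : Int) = (((i - p : Nat) : Nat) : Int) := by omega
      rw [hcast, pvPyGet_some (show i - p < cs.length by omega), pvPyGet_some h]
      have hsub : pvG cs (i - p) = pvG cs (i % p) := by
        rw [hper (i - p) (by omega)]
        congr 1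
        conv_rhs => rw [show i = (i - p) + p by omega]
        rw [Nat.add_mod_right]
      change (if pvG cs (i - p) > pvG cs i then false
        else pvNeckGo cs cs.length (i + 1)
          (if pvG cs (i - p) < pvG cs i then i + 1 else p)) = true ↔ pvNSpec cs
      rcases lt_trichotomy (pvG cs (i - p)) (pvG cs i) with hab | hab | hab
      · rw [if_neg (lt_asymm hab), if_pos hab]
        exact ih (cs.length - (i + 1)) (by omega) (i + 1) (i + 1) rfl
          (pvInv_step_lt hinv' (hsub ▸ hab)) (by omega)
      · rw [if_neg (by rw [hab]; exact lt_irrefl _), if_neg (by rw [hab]; exact lt_irrefl _)]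
        exact ih (cs.length - (i + 1)) (by omega) (i + 1) p rfl
          (pvInv_step_eq hinv' (by rw [← hsub, hab])) (by omega)
      · rw [if_pos hab]
        constructor
        · intro hfalse
          simp at hfalse
        · intro hspec
          exact absurd hspec (pvNotSpec_of_gt hinv' h (hsub ▸ hab))
    · rw [dif_neg h]
      have hieq : i = cs.length := by omega
      subst hieq
      by_cases hdv : cs.length % p = 0
      · constructor
        · intro _
          exact pvSpec_of_dvd hinv' hdv
        · intro _
          simp [hdv]
      · constructor
        · intro hfalse
          simp [hdv] at hfalse
        · intro hspec
          exact absurd hspec (pvNotSpec_of_ndvd hinv' hdv)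

lemma pvIsNecklaceA_iff (cs : List Char) : pvIsNecklaceA cs = true ↔ pvNSpec cs := by
  cases cs with
  | nil =>
    constructor
    · intro _ m hm
      simp at hm
    · intro _
      unfold pvIsNecklaceA pvNeckGo
      norm_num
  | cons c rest =>
    unfold pvIsNecklaceA
    apply pvNeckGo_iff_aux (c :: rest) ((c :: rest).length - 1) 1 1 rfl
    · exact ⟨le_refl 1, le_refl 1, fun k hk => by
        have : k = 0 := by omega
        subst this
        rfl, fun m hm0 hm1 => by omega⟩
    · simp

lemma pvIsNecklaceB_iff (cs : List Char) : pvIsNecklaceB cs = true ↔ pvNSpec cs := by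
  unfold pvIsNecklaceB pvNSpec pvRot
  rw [List.all_eq_true]
  constructor
  · intro h m hm
    have hmem : ((m : Nat) : Int) ∈ PySem.List.pyRange 0 (cs.length : Int) :=
      PySem.List.mem_pyRange_one.mpr ⟨Int.natCast_nonneg m, by exact_mod_cast hm⟩
    have h2 := h _ hmem
    simp only [decide_eq_true_eq] at h2
    rwa [PySem.List.slice_from cs (Int.natCast_nonneg m),
      PySem.List.slice_to cs (Int.natCast_nonneg m), Int.toNat_natCast] at h2
  · intro h x hx
    obtain ⟨hx0, hxn⟩ := PySem.List.mem_pyRange_one.mp hx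
    simp only [decide_eq_true_eq]
    rw [PySem.List.slice_from cs hx0, PySem.List.slice_to cs hx0]
    exact h x.toNat (by omega)

lemma pvNecklaceAB (cs : List Char) : pvIsNecklaceA cs = pvIsNecklaceB cs := by
  by_cases h : pvNSpec cs
  · rw [(pvIsNecklaceA_iff cs).mpr h, (pvIsNecklaceB_iff cs).mpr h]
  · have ha : pvIsNecklaceA cs = false := by
      cases h1 : pvIsNecklaceA cs
      · rfl
      · exact absurd ((pvIsNecklaceA_iff cs).mp h1) h
    have hb : pvIsNecklaceB cs = false := by
      cases h1 : pvIsNecklaceB cs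
      · rfl
      · exact absurd ((pvIsNecklaceB_iff cs).mp h1) h
    rw [ha, hb]

-- === the flip / co-necklace loops on binary strings ===

lemma pvOf0 : PySem.Int.ofCharsBase? ['0'] 10 = some 0 := by decide
lemma pvOf1 : PySem.Int.ofCharsBase? ['1'] 10 = some 1 := by decide
lemma pvTo0 : PySem.Int.toChars 0 = ['0'] := by decide
lemma pvTo1 : PySem.Int.toChars 1 = ['1'] := by decide
lemma pvS0 : String.ofList ['0'] = "0" := rfl
lemma pvS1 : String.ofList ['1'] = "1" := rfl

lemma pvRange_nil {a b : Int} (h : b ≤ a) : PySem.List.pyRange a b = [] := by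
  refine List.eq_nil_iff_forall_not_mem.mpr (fun x hx => ?_)
  have := PySem.List.mem_pyRange_one.mp hx
  omega

lemma pvFlipA_loop (cs : List Char) (hbin : pvBin cs) :
    ∀ (d k : Nat), cs.length - k = d → k ≤ cs.length → ∀ acc : List Char,
      (PySem.List.pyRange (k : Int) (cs.length : Int)).foldl (pvFlipStepA cs) acc =
        acc ++ (cs.drop k).map pvFlipc := by
  intro d
  induction d using Nat.strong_induction_on with
  | _ d ih =>
    intro k hd hk acc
    rcases Nat.lt_or_ge k cs.length with h | h
    · rw [PySem.List.pyRange_one_cons (by exact_mod_cast h), List.foldl_cons]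
      have hstep : pvFlipStepA cs acc (k : Int) = acc ++ [pvFlipc (pvG cs k)] := by
        unfold pvFlipStepA
        rw [pvPyGet_some h]
        rcases hbin (pvG cs k) (by rw [pvG_eq_getElem h]; exact List.getElem_mem h) with h0 | h0 <;>
          rw [h0] <;> simp [pvOf0, pvOf1, pvTo0, pvTo1, pvFlipc]
      rw [show ((k : Int) + 1) = (((k + 1 : Nat) : Int)) by push_cast; ring, hstep,
        ih (cs.length - (k + 1)) (by omega) (k + 1) rfl (by omega)]
      rw [List.drop_eq_getElem_cons h, List.map_cons, pvG_eq_getElem h]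
      simp
    · have hkeq : k = cs.length := by omega
      subst hkeq
      rw [pvRange_nil (by omega), List.foldl_nil, List.drop_length]
      simp

lemma pvFlipA_eq (cs : List Char) (hbin : pvBin cs) : pvFlipA cs = pvFlipB cs := by
  have h := pvFlipA_loop cs hbin cs.length 0 (by omega) (by omega) []
  simp only [Nat.cast_zero, List.drop_zero, List.nil_append] at h
  unfold pvFlipA pvFlipB
  exact h

set_option maxRecDepth 4096 in
lemma pvCoSeqA_loop (cs : List Char) (hbin : pvBin cs) :
    ∀ (d k : Nat), cs.length - k = d → k ≤ cs.length →
      (PySem.List.pyRange (k : Int) (cs.length : Int)).foldl pvCoStepA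
          (cs ++ (cs.take k).map pvFlipc) = cs ++ cs.map pvFlipc := by
  intro d
  induction d using Nat.strong_induction_on with
  | _ d ih =>
    intro k hd hk
    rcases Nat.lt_or_ge k cs.length with h | h
    · rw [PySem.List.pyRange_one_cons (by exact_mod_cast h), List.foldl_cons]
      have hstep : pvCoStepA (cs ++ (cs.take k).map pvFlipc) (k : Int) =
          cs ++ (cs.take (k + 1)).map pvFlipc := by
        unfold pvCoStepA
        rw [PySem.List.pyGet?_natCast, List.getElem?_append,
          if_pos (show k < cs.length from h), List.getElem?_eq_getElem h]
        have htake : (cs.take (k + 1)).map pvFlipc =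
            (cs.take k).map pvFlipc ++ [pvFlipc cs[k]] := by
          rw [List.take_add_one, List.getElem?_eq_getElem h]
          simp only [Option.toList_some, List.map_append, List.map_cons, List.map_nil]
        rcases hbin cs[k] (List.getElem_mem h) with h0 | h0 <;> rw [htake, h0] <;>
          simp [pvOf0, pvOf1, pvTo0, pvTo1, pvFlipc]
      rw [show ((k : Int) + 1) = (((k + 1 : Nat) : Int)) by push_cast; ring, hstep,
        ih (cs.length - (k + 1)) (by omega) (k + 1) rfl (by omega)]
    · have hkeq : k = cs.length := by omega
      subst hkeq
      rw [pvRange_nil (by omega), List.foldl_nil, List.take_length]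

lemma pvCoSeqA_eq (cs : List Char) (hbin : pvBin cs) : pvCoSeqA cs = cs ++ pvFlipB cs := by
  have h := pvCoSeqA_loop cs hbin cs.length 0 (by omega) (by omega)
  simp only [Nat.cast_zero, List.take_zero, List.map_nil, List.append_nil] at h
  unfold pvCoSeqA pvFlipB
  exact h

-- === the j computation: rfind vs the downward break loop ===

lemma pvPrefixOne (xs : List Char) : ['1'].isPrefixOf xs = true ↔ xs[0]? = some '1' := by
  cases xs with
  | nil => simp [List.isPrefixOf]
  | cons c t =>
    show (('1' == c) && true) = true ↔ (c :: t)[0]? = some '1'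
    rw [Bool.and_true, beq_iff_eq, List.getElem?_cons_zero]
    constructor
    · intro h
      rw [← h]
    · intro h
      exact (Option.some_inj.mp h).symm

lemma pvGo_eq (cs : List Char) : ∀ k : Nat,
    PySem.Chars.rfind.go cs ['1'] k =
      (match pvScanDown cs (k + 1) with | some i => (i : Int) | none => -1) := by
  intro k
  induction k with
  | zero =>
    rw [show PySem.Chars.rfind.go cs ['1'] 0 =
      (if ['1'].isPrefixOf cs then (0 : Int) else -1) from rfl]
    rw [show pvScanDown cs (0 + 1) =
      (if PySem.List.pyGet? cs ((0 : Nat) : Int) = some '1' then some 0 else pvScanDown cs 0)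
      from rfl]
    by_cases h : cs[0]? = some '1'
    · rw [if_pos ((pvPrefixOne cs).mpr h),
        if_pos (by rw [PySem.List.pyGet?_natCast]; exact h)]
      rfl
    · rw [if_neg (fun hc => h ((pvPrefixOne cs).mp hc)),
        if_neg (by rw [PySem.List.pyGet?_natCast]; exact h)]
      rfl
  | succ k ihk =>
    rw [show PySem.Chars.rfind.go cs ['1'] (k + 1) =
      (if ['1'].isPrefixOf (List.drop (k + 1) cs) then ((k + 1 : Nat) : Int)
       else PySem.Chars.rfind.go cs ['1'] k) from rfl]
    rw [show pvScanDown cs (k + 1 + 1) =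
      (if PySem.List.pyGet? cs (((k + 1 : Nat)) : Int) = some '1' then some (k + 1)
       else pvScanDown cs (k + 1)) from rfl]
    have hdrop : (List.drop (k + 1) cs)[0]? = cs[k + 1]? := by
      rw [List.getElem?_drop]
    by_cases h : cs[k + 1]? = some '1'
    · rw [if_pos ((pvPrefixOne _).mpr (by rw [hdrop]; exact h)),
        if_pos (by rw [PySem.List.pyGet?_natCast]; exact h)]
    · rw [if_neg (fun hc => h (by rw [← hdrop]; exact (pvPrefixOne _).mp hc)),
        if_neg (by rw [PySem.List.pyGet?_natCast]; exact h), ihk]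

lemma pvScanDown_top (cs : List Char) :
    pvScanDown cs (cs.length + 1) = pvScanDown cs cs.length := by
  rw [show pvScanDown cs (cs.length + 1) =
    (if PySem.List.pyGet? cs ((cs.length : Nat) : Int) = some '1' then some cs.length
     else pvScanDown cs cs.length) from rfl,
    if_neg (by rw [PySem.List.pyGet?_natCast]; simp)]

lemma pvJ_eq (cs : List Char) : pvJA cs = pvJB cs := by
  rw [pvJA, pvJB,
    show PySem.Chars.rfind cs ['1'] = PySem.Chars.rfind.go cs ['1'] cs.length from rfl,
    pvGo_eq, pvScanDown_top]
  cases h : pvScanDown cs cs.length with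
  | none =>
    show (cs.length : Int) - 1 = if (-1 : Int) < 0 then (cs.length : Int) - 1 else -1
    norm_num
  | some i =>
    show (i : Int) = if (i : Int) < 0 then (cs.length : Int) - 1 else (i : Int)
    rw [if_neg (by omega)]

-- === assembling ccr2_next ===

lemma pvJA_nonneg (cs : List Char) (hne : cs ≠ []) : 0 ≤ pvJA cs := by
  rw [pvJA]
  cases h : pvScanDown cs cs.length with
  | none =>
    show 0 ≤ (cs.length : Int) - 1
    have : cs.length ≠ 0 := fun hc => hne (List.eq_nil_of_length_eq_zero hc)
    omega
  | some i =>
    show 0 ≤ (i : Int)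
    omega

lemma pvBin_slice₂ (cs : List Char) (hbin : pvBin cs) {j : Int} (hj : 0 ≤ j) :
    pvBin (PySem.List.slice cs (some 1) (some (j + 1))) := by
  intro c hc
  rw [show j + 1 = ((j.toNat + 1 : Nat) : Int) by omega,
    show (1 : Int) = ((1 : Nat) : Int) by norm_num, PySem.List.slice_natCast] at hc
  exact hbin c (List.mem_of_mem_drop (List.mem_of_mem_take hc))

lemma pvBin_gamma (cs : List Char) (hbin : pvBin cs) (hne : cs ≠ []) :
    pvBin (pvGammaB cs) := by
  have hj : 0 ≤ pvJB cs := pvJ_eq cs ▸ pvJA_nonneg cs hne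
  intro c hc
  rw [pvGammaB] at hc
  rcases List.mem_append.mp hc with hc | hc
  · rcases List.mem_append.mp hc with hc | hc
    · rw [PySem.List.slice_from cs (by omega)] at hc
      exact hbin c (List.mem_of_mem_drop hc)
    · simp at hc
      right; exact hc
  · rw [pvFlipB] at hc
    obtain ⟨x, hx, rfl⟩ := List.mem_map.mp hc
    rcases pvBin_slice₂ cs hbin hj x hx with h0 | h0 <;> rw [h0] <;> simp [pvFlipc]

lemma pvGamma_eq (cs : List Char) (hbin : pvBin cs) (hne : cs ≠ []) :
    pvGemmaA cs = pvGammaB cs := by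
  rw [pvGemmaA, pvGammaB, pvJ_eq]
  rw [pvFlipA_eq _ (pvBin_slice₂ cs hbin (pvJ_eq cs ▸ pvJA_nonneg cs hne))]

-- ===== VERDICT (by name: the statement is the Claim_ definition above) =====
theorem ccr2_next_spec : Claim_equal_ccr2_next := by
  intro seq _ hpre
  obtain ⟨hne, hbin'⟩ := hpre
  have hbin : ∀ c ∈ seq.toList, c = '0' ∨ c = '1' := fun c hc => by
    simpa using List.all_eq_true.mp hbin' c hc
  show ccr2_next seq = ccr2_next_alt seq
  have hCo : pvIsCoNecklaceA (pvGemmaA seq.toList) = pvIsCoNecklaceB (pvGammaB seq.toList) := by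
    rw [pvGamma_eq _ hbin hne, pvIsCoNecklaceA, pvIsCoNecklaceB,
      pvCoSeqA_eq _ (pvBin_gamma _ hbin hne), pvNecklaceAB]
  cases hcs : seq.toList with
  | nil => exact absurd hcs hne
  | cons c rest =>
    rw [hcs] at hCo
    have hc01 : c = '0' ∨ c = '1' := hbin c (by rw [hcs]; exact List.mem_cons_self ..)
    rw [ccr2_next, ccr2_next_alt, hcs, hCo]
    cases hb : pvIsCoNecklaceB (pvGammaB (c :: rest)) with
    | true => simp
    | false =>
      rcases hc01 with h0 | h0 <;> subst h0 <;>
        simp [pvOf0, pvOf1, pvTo0, pvTo1, pvS0, pvS1, pvFlipB, pvFlipc]
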